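-- pv_equiv track=rewrite | github.com/ForexYemeni/TradeSignal-Pro | fix_lines.py | find_break
-- ===== SOURCE A (Python) =====
-- def find_break(content, max_len):
--     """Find the best break position in content string."""
--     n = len(content)
--     if n <= max_len:
--         return -1
--
--     # Parse to find break points with their types
--     in_str = False
--     sc = None
--     paren_depth = 0
--     candidates = []
--
--     i = 0
--     while i < n:
--         c = content[i]
--         if in_str:
--             if c == '\\':
--                 i += 2
--                 continue
--             if c == sc:
--                 in_str = False
--         else:
--             if c in ('"', "'"):
--                 in_str = True
--                 sc = c
--             elif c == '(':
--                 paren_depth += 1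
--             elif c == ')':
--                 paren_depth -= 1
--             elif c == ',' and paren_depth >= 1:
--                 # Break after comma+space
--                 candidates.append((i+2, 3, 'comma'))  # pos, priority, type
--             elif i + 1 < n and content[i:i+4] == ' or ' and paren_depth >= 0:
--                 candidates.append((i+4, 2, 'or'))
--             elif i + 1 < n and content[i:i+5] == ' and ' and paren_depth >= 0:
--                 candidates.append((i+5, 2, 'and'))
--             elif c == '+' and i + 1 < n and content[i+1] == ' ' and paren_depth >= 0:
--                 candidates.append((i+2, 1, 'plus'))
--         i += 1
--
--     # Find best candidate: closest to max_len but not less than 15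
--     # Prefer commas inside parens, then or/and, then plus
--     best = -1
--     best_priority = -1
--     best_dist = 999
--
--     for pos, pri, typ in candidates:
--         if pos < 15 or pos > max_len + 20:
--             continue
--         dist = abs(pos - max_len)
--         # Prefer closer to max_len, but also prefer higher priority
--         if pos <= max_len:
--             # Inside the limit - good
--             if pri > best_priority or (pri == best_priority and dist < best_dist):
--                 best = pos
--                 best_priority = pri
--                 best_dist = dist
--         elif pos <= max_len + 20:
--             # Slightly over - only if no good in-limit option found yet
--             if best < 15:  # No good option found yet
--                 if pri > best_priority or (pri == best_priority and pos < best or best < 15):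
--                     best = pos
--                     best_priority = pri
--                     best_dist = dist
--
--     if best < 15:
--         # Desperate: find any space between 15 and max_len
--         for i in range(min(n-1, max_len), 14, -1):
--             if content[i] == ' ':
--                 return i + 1
--         return -1
--
--     return best
-- ===== SOURCE B (Python) =====
-- def find_break(content, max_len):
--     """Find the best break position in content string (single fused pass)."""
--     n = len(content)
--     if n <= max_len:
--         return -1
--
--     in_str = False
--     sc = None
--     depth = 0
--     best = -1
--     best_pri = -1
--     best_dist = 999
--
--     def consider(pos, pri):
--         nonlocal best, best_pri, best_dist
--         if pos < 15 or pos > max_len + 20: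
--             return
--         dist = abs(pos - max_len)
--         if pos <= max_len:
--             if pri > best_pri or (pri == best_pri and dist < best_dist):
--                 best, best_pri, best_dist = pos, pri, dist
--         elif best < 15:
--             # over the limit and nothing good yet: take it
--             best, best_pri, best_dist = pos, pri, dist
--
--     i = 0
--     while i < n:
--         c = content[i]
--         if in_str:
--             if c == '\\':
--                 i += 2
--                 continue
--             if c == sc:
--                 in_str = False
--         else:
--             if c in ('"', "'"):
--                 in_str = True
--                 sc = c
--             elif c == '(':
--                 depth += 1
--             elif c == ')':
--                 depth -= 1
--             elif c == ',' and depth >= 1: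
--                 consider(i + 2, 3)
--             elif i + 1 < n and content[i:i+4] == ' or ' and depth >= 0:
--                 consider(i + 4, 2)
--             elif i + 1 < n and content[i:i+5] == ' and ' and depth >= 0:
--                 consider(i + 5, 2)
--             elif c == '+' and i + 1 < n and content[i+1] == ' ' and depth >= 0:
--                 consider(i + 2, 1)
--         i += 1
--
--     if best >= 15:
--         return best
--     # Desperate: find any space between 15 and max_len
--     for i in range(min(n - 1, max_len), 14, -1):
--         if content[i] == ' ':
--             return i + 1
--     return -1
-- ===== Notes on version B (the rewrite author's own statement) =====
-- stated objective: alternative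
-- what changed: B fuses A's two phases (build a candidates list, then fold a selection rule over it) into a single scan that carries the parser state and the selection accumulators together, applying a simplified selection update (A's over-limit inner condition is a tautology under its best<15 gate) to each candidate as it is found; the intermediate candidates list disappears.
import Mathlib
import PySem

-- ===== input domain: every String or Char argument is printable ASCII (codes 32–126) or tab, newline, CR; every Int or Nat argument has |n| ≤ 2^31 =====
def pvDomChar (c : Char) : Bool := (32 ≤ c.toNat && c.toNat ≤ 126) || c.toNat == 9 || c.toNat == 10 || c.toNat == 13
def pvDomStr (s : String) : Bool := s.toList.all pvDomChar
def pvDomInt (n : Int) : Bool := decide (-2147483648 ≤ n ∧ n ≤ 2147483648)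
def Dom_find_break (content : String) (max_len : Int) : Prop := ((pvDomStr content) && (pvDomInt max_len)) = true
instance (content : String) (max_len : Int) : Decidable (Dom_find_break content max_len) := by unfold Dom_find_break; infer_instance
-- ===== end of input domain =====

-- B fuses A's two phases (candidate collection, then selection) into one scan with inline
-- selection accumulators, dropping the candidates list; objective: alternative (same cost).

-- ===== PORT A =====
-- Parser loop of A: walks the string, collecting candidate (pos, priority, type) triples.
-- fuel is a totality guard only: i advances by ≥ 1 per step, so fuel = cs.length never
-- runs out before i ≥ cs.length.  content[i:i+4] with 0 ≤ i < n is exactly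
-- (cs.drop i).take 4 (Python slices truncate).
def parseA (cs : List Char) : Nat → Nat → Bool → Option Char → Int →
    List (Int × Int × String)
  | 0, _, _, _, _ => []
  | fuel + 1, i, in_str, sc, pd =>
    if h : i < cs.length then
      let c := cs[i]
      if in_str then
        if c = '\\' then parseA cs fuel (i + 2) in_str sc pd
        else if some c = sc then parseA cs fuel (i + 1) false sc pd
        else parseA cs fuel (i + 1) in_str sc pd
      else
        if c = '"' ∨ c = '\'' then parseA cs fuel (i + 1) true (some c) pd
        else if c = '(' then parseA cs fuel (i + 1) in_str sc (pd + 1)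
        else if c = ')' then parseA cs fuel (i + 1) in_str sc (pd - 1)
        else if c = ',' ∧ 1 ≤ pd then
          ((i : Int) + 2, 3, "comma") :: parseA cs fuel (i + 1) in_str sc pd
        else if i + 1 < cs.length ∧ (cs.drop i).take 4 = " or ".toList ∧ 0 ≤ pd then
          ((i : Int) + 4, 2, "or") :: parseA cs fuel (i + 1) in_str sc pd
        else if i + 1 < cs.length ∧ (cs.drop i).take 5 = " and ".toList ∧ 0 ≤ pd then
          ((i : Int) + 5, 2, "and") :: parseA cs fuel (i + 1) in_str sc pd
        else if c = '+' ∧ (i + 1 < cs.length ∧ cs.getD (i + 1) 'x' = ' ') ∧ 0 ≤ pd then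
          ((i : Int) + 2, 1, "plus") :: parseA cs fuel (i + 1) in_str sc pd
        else parseA cs fuel (i + 1) in_str sc pd
    else []

-- Selection loop body of A, applied to one candidate; state = (best, best_priority, best_dist).
def stepA (max_len : Int) (s : Int × Int × Int) (cand : Int × Int × String) : Int × Int × Int :=
  let (best, bp, bd) := s
  let (pos, pri, _) := cand
  if pos < 15 ∨ max_len + 20 < pos then s
  else
    let dist := |pos - max_len|
    if pos ≤ max_len then
      if bp < pri ∨ (pri = bp ∧ dist < bd) then (pos, pri, dist) else s
    else if pos ≤ max_len + 20 then
      if best < 15 then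
        if bp < pri ∨ ((pri = bp ∧ pos < best) ∨ best < 15) then (pos, pri, dist) else s
      else s
    else s

-- Desperate fallback of A: first space found scanning the given (descending) index range;
-- indices produced by the range are always in [15, n-1], so getD's default is never read.
def fallbackA (cs : List Char) : List Int → Int
  | [] => -1
  | i :: rest => if cs.getD i.toNat 'x' = ' ' then i + 1 else fallbackA cs rest

def find_break (content : String) (max_len : Int) : Int :=
  let cs := content.toList
  let n : Int := cs.length
  if n ≤ max_len then -1
  else
    let cands := parseA cs cs.length 0 false none 0
    let s := cands.foldl (stepA max_len) (-1, -1, 999)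
    if s.1 < 15 then
      fallbackA cs (PySem.List.pyRange (min (n - 1) max_len) 14 (-1))
    else s.1

-- ===== PORT B =====
-- B's inline `consider`: update the selection state with one candidate.
def considerB (max_len : Int) (s : Int × Int × Int) (pos pri : Int) : Int × Int × Int :=
  if pos < 15 ∨ max_len + 20 < pos then s
  else
    let dist := |pos - max_len|
    if pos ≤ max_len then
      if s.2.1 < pri ∨ (pri = s.2.1 ∧ dist < s.2.2) then (pos, pri, dist) else s
    else if s.1 < 15 then (pos, pri, dist)
    else s

-- B's single fused scan: parser state and selection state carried together (same fuel guard).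
def fusedB (cs : List Char) (max_len : Int) : Nat → Nat → Bool → Option Char → Int →
    Int × Int × Int → Int × Int × Int
  | 0, _, _, _, _, s => s
  | fuel + 1, i, in_str, sc, pd, s =>
    if h : i < cs.length then
      let c := cs[i]
      if in_str then
        if c = '\\' then fusedB cs max_len fuel (i + 2) in_str sc pd s
        else if some c = sc then fusedB cs max_len fuel (i + 1) false sc pd s
        else fusedB cs max_len fuel (i + 1) in_str sc pd s
      else
        if c = '"' ∨ c = '\'' then fusedB cs max_len fuel (i + 1) true (some c) pd s
        else if c = '(' then fusedB cs max_len fuel (i + 1) in_str sc (pd + 1) s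
        else if c = ')' then fusedB cs max_len fuel (i + 1) in_str sc (pd - 1) s
        else if c = ',' ∧ 1 ≤ pd then
          fusedB cs max_len fuel (i + 1) in_str sc pd (considerB max_len s ((i : Int) + 2) 3)
        else if i + 1 < cs.length ∧ (cs.drop i).take 4 = " or ".toList ∧ 0 ≤ pd then
          fusedB cs max_len fuel (i + 1) in_str sc pd (considerB max_len s ((i : Int) + 4) 2)
        else if i + 1 < cs.length ∧ (cs.drop i).take 5 = " and ".toList ∧ 0 ≤ pd then
          fusedB cs max_len fuel (i + 1) in_str sc pd (considerB max_len s ((i : Int) + 5) 2)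
        else if c = '+' ∧ (i + 1 < cs.length ∧ cs.getD (i + 1) 'x' = ' ') ∧ 0 ≤ pd then
          fusedB cs max_len fuel (i + 1) in_str sc pd (considerB max_len s ((i : Int) + 2) 1)
        else fusedB cs max_len fuel (i + 1) in_str sc pd s
    else s

-- B's fallback: same backward space search as A's (indices always in range).
def fallbackB (cs : List Char) : List Int → Int
  | [] => -1
  | i :: rest => if cs.getD i.toNat 'x' = ' ' then i + 1 else fallbackB cs rest

def find_break_alt (content : String) (max_len : Int) : Int :=
  let cs := content.toList
  let n : Int := cs.length
  if n ≤ max_len then -1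
  else
    let s := fusedB cs max_len cs.length 0 false none 0 (-1, -1, 999)
    if 15 ≤ s.1 then s.1
    else fallbackB cs (PySem.List.pyRange (min (n - 1) max_len) 14 (-1))

-- ===== PRECONDITION & SPEC =====
def Spec_find_break (content : String) (max_len : Int) (out : Int) : Prop := out = find_break_alt content max_len
instance (content : String) (max_len : Int) (out : Int) : Decidable (Spec_find_break content max_len out) := by unfold Spec_find_break; infer_instance

-- ===== CLAIM (what is proved, stated in full; the proofs are below) =====
def Claim_equal_find_break : Prop := ∀ (content : String) (max_len : Int), Dom_find_break content max_len → Spec_find_break content max_len (find_break content max_len)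

-- ===== LEMMAS AND PROOFS =====

-- one candidate: A's fold step equals B's inline consider (the over-limit inner condition
-- of A is a tautology under its `best < 15` gate)
theorem considerB_eq_stepA (ml pos pri : Int) (typ : String) (s : Int × Int × Int) :
    considerB ml s pos pri = stepA ml s (pos, pri, typ) := by
  obtain ⟨best, bp, bd⟩ := s
  simp only [considerB, stepA]
  split_ifs with h1 h2 h3 h4 h5 h6 h7 <;> first | rfl | omega

-- the fused scan computes A's fold of the selection step over A's candidate list
-- the fused scan computes A's fold of the selection step over A's candidate list
theorem fusedB_eq (cs : List Char) (ml : Int) :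
    ∀ fuel i b sc pd (s : Int × Int × Int),
      fusedB cs ml fuel i b sc pd s = (parseA cs fuel i b sc pd).foldl (stepA ml) s := by
  intro fuel
  induction fuel with
  | zero => intro i b sc pd s; rfl
  | succ fuel ih =>
    intro i b sc pd s
    rw [fusedB, parseA]
    by_cases hlen : i < cs.length
    · simp only [dif_pos hlen]
      split_ifs <;>
        first
          | exact ih _ _ _ _ _
          | (rw [List.foldl_cons, ← considerB_eq_stepA]; exact ih _ _ _ _ _)
    · simp only [dif_neg hlen]
      rfl

theorem fallbackB_eq (cs : List Char) (l : List Int) : fallbackB cs l = fallbackA cs l := by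
  induction l with
  | nil => rfl
  | cons i rest ih => simp [fallbackA, fallbackB, ih]

-- ===== VERDICT (by name: the statement is the Claim_ definition above) =====
theorem find_break_spec : Claim_equal_find_break := by
  intro content max_len _
  show find_break content max_len = find_break_alt content max_len
  unfold find_break find_break_alt
  by_cases hn : ((content.toList.length : Int)) ≤ max_len
  · rw [if_pos hn, if_pos hn]
  · rw [if_neg hn, if_neg hn, fusedB_eq, fallbackB_eq]
    by_cases h : ((parseA content.toList content.toList.length 0 false none 0).foldl (stepA max_len) (-1, -1, 999)).1 < 15
    · rw [if_pos h, if_neg (by omega)]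
    · rw [if_neg h, if_pos (by omega)]
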